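-- pv_equiv track=rewrite | github.com/kkomma/test-automation-basics | appdynamics/kingpath.py | kingPath
-- ===== SOURCE A (Python) =====
-- def kingPath(n,m):
--     dp=[[0]*(m+1) for _ in range(n+1)]
--     for i in range(1,n+1):
--         for j in range(1,m+1):
--             if i==1 or j==1:
--                 dp[i][j]=1
--             else:
--                 dp[i][j]=dp[i-1][j]+dp[i][j-1]+dp[i-1][j-1]
--     return dp[-1][-1]
-- ===== SOURCE B (Python) =====
-- def _comb(x, k):
--     c = 1
--     for i in range(k):
--         c = c * (x - i) // (i + 1)
--     return c
--
-- def kingPath(n, m):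
--     if n <= 0 or m <= 0:
--         return 0
--     a, b = n - 1, m - 1
--     total = 0
--     for k in range(min(a, b) + 1):
--         total += _comb(a, k) * _comb(b, k) * 2 ** k
--     return total
-- ===== Notes on version B (the rewrite author's own statement) =====
-- stated objective: alternative
-- what changed: Replaces the O(n*m) dynamic-programming table with the Delannoy closed form sum_k C(n-1,k)*C(m-1,k)*2^k, computed in min(n,m) loop iterations with incrementally built binomial coefficients.
import Mathlib
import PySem

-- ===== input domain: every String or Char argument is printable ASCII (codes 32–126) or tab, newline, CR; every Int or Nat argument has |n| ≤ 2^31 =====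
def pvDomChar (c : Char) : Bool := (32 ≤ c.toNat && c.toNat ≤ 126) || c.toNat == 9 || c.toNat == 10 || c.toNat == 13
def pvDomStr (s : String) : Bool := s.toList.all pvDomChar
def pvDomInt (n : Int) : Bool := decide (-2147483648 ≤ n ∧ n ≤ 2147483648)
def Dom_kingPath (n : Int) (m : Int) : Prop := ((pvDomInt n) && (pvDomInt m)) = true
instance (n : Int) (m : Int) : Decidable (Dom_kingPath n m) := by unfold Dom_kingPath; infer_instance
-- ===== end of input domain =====

-- B replaces A's DP table (n*m loop iterations) with the Delannoy closed form ∑ C(n-1,k)C(m-1,k)2^k (min(n,m) loop iterations); equal return values on n, m ≥ 0.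

-- ===== PORT A =====
-- dp[i][j] read; on Pre_ every read inside the loops and the final dp[-1][-1] is in range,
-- so the `.getD 0` default is never consulted there (outside Pre_ Python raises IndexError).
def pvGet2 (dp : List (List Int)) (i j : Int) : Int :=
  ((PySem.List.pyGet? dp i).bind (fun r => PySem.List.pyGet? r j)).getD 0

-- dp[i][j] = v ; in the loops i, j come from range(1, …), so they are nonnegative and in range (exact there)
def pvSet2 (dp : List (List Int)) (i j : Int) (v : Int) : List (List Int) :=
  dp.set i.toNat ((dp.getD i.toNat []).set j.toNat v)

def pvInnerStep (dp : List (List Int)) (i j : Int) : List (List Int) :=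
  let v : Int :=
    if i = 1 ∨ j = 1 then 1
    else pvGet2 dp (i-1) j + pvGet2 dp i (j-1) + pvGet2 dp (i-1) (j-1)
  pvSet2 dp i j v

def pvOuterStep (m : Int) (dp : List (List Int)) (i : Int) : List (List Int) :=
  (PySem.List.pyRange 1 (m+1) 1).foldl (fun dp j => pvInnerStep dp i j) dp

def kingPath (n : Int) (m : Int) : Int :=
  let dp0 : List (List Int) :=
    (PySem.List.pyRange 0 (n+1) 1).map (fun _ => List.replicate (m+1).toNat 0)
  let dp := (PySem.List.pyRange 1 (n+1) 1).foldl (pvOuterStep m) dp0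
  pvGet2 dp (-1) (-1)

-- ===== PORT B =====
-- helper _comb(x, k): c = 1; for i in range(k): c = c*(x-i)//(i+1)
def pvComb (x k : Int) : Int :=
  (PySem.List.pyRange 0 k 1).foldl (fun c i => PySem.Int.floordiv (c * (x - i)) (i + 1)) 1

def kingPath_alt (n : Int) (m : Int) : Int :=
  if n ≤ 0 ∨ m ≤ 0 then 0
  else
    let a := n - 1
    let b := m - 1
    -- 2 ** k with k from range(…) is nonnegative, so 2 ^ k.toNat is exact
    (PySem.List.pyRange 0 (min a b + 1) 1).foldl
      (fun total k => total + pvComb a k * pvComb b k * 2 ^ k.toNat) 0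

-- ===== PRECONDITION & SPEC =====
-- Pre_ excludes exactly n < 0 or m < 0, where A raises IndexError (dp[-1][-1] on an empty list).
def Pre_kingPath (n : Int) (m : Int) : Prop := 0 ≤ n ∧ 0 ≤ m
instance (n : Int) (m : Int) : Decidable (Pre_kingPath n m) := by unfold Pre_kingPath; infer_instance

def pvWitness_kingPath : Int × Int := (3, 4)

def Spec_kingPath (n : Int) (m : Int) (out : Int) : Prop := out = kingPath_alt n m
instance (n : Int) (m : Int) (out : Int) : Decidable (Spec_kingPath n m out) := by unfold Spec_kingPath; infer_instance

-- ===== CLAIM (what is proved, stated in full; the proofs are below) =====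
def Claim_equal_kingPath : Prop := ∀ (n : Int) (m : Int), Dom_kingPath n m → Pre_kingPath n m → Spec_kingPath n m (kingPath n m)

-- ===== LEMMAS AND PROOFS =====

-- The value A's table holds at dp[i][j] once both loops are done (0 = untouched).
def pvT : Nat → Nat → Nat
  | 0, _ => 0
  | _+1, 0 => 0
  | 1, _+1 => 1
  | _+2, 1 => 1
  | i+2, j+2 => pvT (i+1) (j+2) + pvT (i+2) (j+1) + pvT (i+1) (j+1)

-- Delannoy numbers by their recurrence.
def pvDel : Nat → Nat → Nat
  | 0, _ => 1
  | _+1, 0 => 1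
  | a+1, b+1 => pvDel a (b+1) + pvDel (a+1) b + pvDel a b

-- partial sums of the closed form, and the cross sum used for Pascal's rule
def pvS (N a b : Nat) : Nat := ∑ k ∈ Finset.range N, a.choose k * b.choose k * 2^k
def pvH (N a b : Nat) : Nat := ∑ k ∈ Finset.range N, a.choose k * b.choose (k+1) * 2^(k+1)

lemma pvS_pascal (N a b : Nat) : pvS (N+1) (a+1) b = pvS (N+1) a b + pvH N a b := by
  simp only [pvS, pvH, Finset.sum_range_succ']
  simp only [Nat.choose_succ_succ, Nat.succ_eq_add_one, add_mul, Finset.sum_add_distrib,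
    Nat.choose_zero_right]
  ring_nf

lemma pvH_pascal (N a b : Nat) : pvH N a (b+1) = 2 * pvS N a b + pvH N a b := by
  simp only [pvS, pvH, Nat.choose_succ_succ, Nat.succ_eq_add_one, mul_add, add_mul,
    Finset.sum_add_distrib, Finset.mul_sum]
  ring_nf

lemma pvS_stab (a b : Nat) {N M : Nat} (hN : min a b + 1 ≤ N) (hM : min a b + 1 ≤ M) :
    pvS N a b = pvS M a b := by
  have key : ∀ K, min a b + 1 ≤ K → pvS K a b = pvS (min a b + 1) a b := by
    intro K hK
    unfold pvS
    apply (Finset.sum_subset (by intro x hx; simp only [Finset.mem_range] at *; omega) _).symm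
    intro k _ hk
    simp only [Finset.mem_range, not_lt] at hk
    rcases le_total a b with h | h
    · rw [Nat.choose_eq_zero_of_lt (show a < k by omega)]; ring
    · rw [Nat.choose_eq_zero_of_lt (show b < k by omega)]; ring
  rw [key N hN, key M hM]

lemma pvS_zero_left (b : Nat) : pvS 1 0 b = 1 := by simp [pvS]

lemma pvS_right_zero (a : Nat) : pvS (a+1) a 0 = 1 := by
  unfold pvS
  rw [Finset.sum_range_succ']
  simp [Nat.choose_zero_succ]

lemma pvDel_eq_S (a b : Nat) : pvDel a b = pvS (a+1) a b := by
  have main : ∀ n a b, a + b ≤ n → pvDel a b = pvS (a+1) a b := by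
    intro n
    induction n with
    | zero =>
      intro a b h
      have ha : a = 0 := by omega
      subst ha
      simpa [pvDel] using (pvS_zero_left b).symm
    | succ n ih =>
      intro a b h
      match a, b with
      | 0, b => simpa [pvDel] using (pvS_zero_left b).symm
      | a+1, 0 => simpa [pvDel] using (pvS_right_zero (a+1)).symm
      | a+1, b+1 =>
        have h1 : pvDel a (b+1) = pvS (a+1) a (b+1) := ih a (b+1) (by omega)
        have h2 : pvDel (a+1) b = pvS (a+2) (a+1) b := ih (a+1) b (by omega)
        have h3 : pvDel a b = pvS (a+1) a b := ih a b (by omega)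
        set M := a + b + 1 with hM
        have s1 : pvS (a+1) a (b+1) = pvS (M+1) a (b+1) := pvS_stab _ _ (by omega) (by omega)
        have s2 : pvS (a+2) (a+1) b = pvS (M+1) (a+1) b := pvS_stab _ _ (by omega) (by omega)
        have s3 : pvS (a+1) a b = pvS (M+1) a b := pvS_stab _ _ (by omega) (by omega)
        have s3' : pvS (a+1) a b = pvS M a b := pvS_stab _ _ (by omega) (by omega)
        have e1 : pvS (M+1) (a+1) (b+1) = pvS (M+1) a (b+1) + pvH M a (b+1) := pvS_pascal M a (b+1)
        have e2 : pvH M a (b+1) = 2 * pvS M a b + pvH M a b := pvH_pascal M a b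
        have e3 : pvS (M+1) (a+1) b = pvS (M+1) a b + pvH M a b := pvS_pascal M a b
        have stgt : pvS (a+1+1) (a+1) (b+1) = pvS (M+1) (a+1) (b+1) := pvS_stab _ _ (by omega) (by omega)
        have s4 : pvS M a b = pvS (M+1) a b := pvS_stab _ _ (by omega) (by omega)
        simp only [pvDel]
        rw [h1, h2, h3, stgt, s1, s2, e1, e2]
        linarith [e3, s4]
  exact main (a+b) a b le_rfl

lemma pvT_succ (a b : Nat) : pvT (a+1) (b+1) = pvDel a b := by
  have main : ∀ n a b, a + b ≤ n → pvT (a+1) (b+1) = pvDel a b := by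
    intro n
    induction n with
    | zero =>
      intro a b h
      have ha : a = 0 := by omega
      have hb : b = 0 := by omega
      subst ha; subst hb; simp [pvT, pvDel]
    | succ n ih =>
      intro a b h
      match a, b with
      | 0, b => simp [pvT, pvDel]
      | a+1, 0 => simp [pvT, pvDel]
      | a+1, b+1 =>
        rw [show a+1+1 = a+2 from rfl, show b+1+1 = b+2 from rfl]
        simp only [pvT, pvDel]
        rw [show a+1 = a+0+1 from rfl]
        rw [ih a (b+1) (by omega), ih (a+1) b (by omega), ih a b (by omega)]
  exact main (a+b) a b le_rfl

-- ---- B-side: the comb loop computes the binomial coefficient, the main loop sums the closed form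

lemma pvComb_eq (x k : Nat) (hk : k ≤ x) : pvComb (x : Int) (k : Int) = (x.choose k : Int) := by
  induction k with
  | zero => simp [pvComb, PySem.List.pyRange_one_eq_nil]
  | succ k ih =>
    have hk' : k ≤ x := by omega
    unfold pvComb at *
    rw [show ((k+1:Nat):Int) = (k:Int) + 1 by push_cast; ring,
        PySem.List.pyRange_one_succ_right (by positivity), List.foldl_append, ih hk']
    simp only [List.foldl_cons, List.foldl_nil]
    rw [show (x:Int) - (k:Int) = ((x - k : Nat) : Int) by push_cast [hk']; ring]
    rw [show ((k:Int) + 1) = ((k+1 : Nat) : Int) by push_cast; ring]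
    rw [show ((x.choose k : Int) * ((x - k : Nat) : Int)) = ((x.choose k * (x - k) : Nat) : Int) by push_cast; ring]
    rw [← Nat.choose_succ_right_eq]
    rw [PySem.Int.floordiv_natCast]
    rw [Nat.mul_div_cancel _ (by omega)]

lemma alt_fold (a b : Nat) : ∀ t, t ≤ min a b + 1 → ∀ (acc : Int),
    (PySem.List.pyRange 0 (t : Int) 1).foldl
      (fun total k => total + pvComb (a:Int) k * pvComb (b:Int) k * 2 ^ k.toNat) acc
    = acc + ((pvS t a b : Nat) : Int) := by
  intro t
  induction t with
  | zero => intro _ acc; simp [pvS, PySem.List.pyRange_one_eq_nil]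
  | succ t ih =>
    intro ht acc
    rw [show ((t+1:Nat):Int) = (t:Int) + 1 by push_cast; ring,
      PySem.List.pyRange_one_succ_right (by positivity), List.foldl_append,
      ih (by omega) acc]
    simp only [List.foldl_cons, List.foldl_nil]
    rw [pvComb_eq a t (by omega), pvComb_eq b t (by omega)]
    rw [show ((t:Int)).toNat = t by omega]
    unfold pvS
    rw [Finset.sum_range_succ]
    push_cast
    ring

lemma alt_eq_S (a b : Nat) :
    kingPath_alt ((a : Int) + 1) ((b : Int) + 1) = ((pvS (min a b + 1) a b : Nat) : Int) := by
  unfold kingPath_alt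
  rw [if_neg (by push_cast; omega)]
  have e1 : ((a:Int) + 1 - 1) = (a : Int) := by ring
  have e2 : ((b:Int) + 1 - 1) = (b : Int) := by ring
  simp only [e1, e2]
  rw [show (min (a:Int) (b:Int) + 1) = ((min a b + 1 : Nat) : Int) by push_cast; ring]
  rw [alt_fold a b (min a b + 1) le_rfl 0]
  ring

-- ---- A-side: loop invariant — the table after row i is pvTbl i

lemma pvT_zero_left (j : Nat) : pvT 0 j = 0 := by cases j <;> simp [pvT]
lemma pvT_zero_right (i : Nat) : pvT i 0 = 0 := by cases i <;> simp [pvT]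

def pvRow (m' r : Nat) : List Int := (List.range (m'+1)).map (fun j => (pvT r j : Int))
def pvPRow (m' i j : Nat) : List Int :=
  (List.range (m'+1)).map (fun jj => if jj ≤ j then (pvT i jj : Int) else 0)
def pvTbl (n' m' i : Nat) : List (List Int) :=
  (List.range (n'+1)).map (fun r => if r ≤ i then pvRow m' r else pvRow m' 0)

lemma pvRow_zero (m' : Nat) : pvRow m' 0 = List.replicate (m'+1) 0 := by
  simp [pvRow, pvT_zero_left, List.map_const']

lemma length_pvRow (m' r : Nat) : (pvRow m' r).length = m'+1 := by simp [pvRow]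
lemma length_pvPRow (m' i j : Nat) : (pvPRow m' i j).length = m'+1 := by simp [pvPRow]
lemma length_pvTbl (n' m' i : Nat) : (pvTbl n' m' i).length = n'+1 := by simp [pvTbl]

lemma pvPRow_zero (m' i : Nat) : pvPRow m' i 0 = pvRow m' 0 := by
  simp only [pvPRow, pvRow]
  apply List.map_congr_left
  intro jj _
  rcases Nat.eq_zero_or_pos jj with h | h
  · subst h; simp [pvT_zero_right]
  · rw [if_neg (by omega), pvT_zero_left]; simp

lemma pvPRow_full (m' i j : Nat) (h : m' ≤ j) : pvPRow m' i j = pvRow m' i := by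
  simp only [pvPRow, pvRow]
  apply List.map_congr_left
  intro jj hjj
  simp only [List.mem_range] at hjj
  rw [if_pos (by omega)]

lemma pvTbl_getElem (n' m' i r : Nat) (h : r < n'+1) :
    (pvTbl n' m' i)[r]'(by simp [length_pvTbl, h]) = if r ≤ i then pvRow m' r else pvRow m' 0 := by
  simp [pvTbl]

lemma pvRow_getElem (m' r j : Nat) (h : j < m'+1) :
    (pvRow m' r)[j]'(by simp [length_pvRow, h]) = (pvT r j : Int) := by
  simp [pvRow]

lemma pvPRow_getElem (m' i j jj : Nat) (h : jj < m'+1) :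
    (pvPRow m' i j)[jj]'(by simp [length_pvPRow, h]) = if jj ≤ j then (pvT i jj : Int) else 0 := by
  simp [pvPRow]

lemma pvPRow_set (m' i j : Nat) (hj : j + 1 ≤ m') :
    (pvPRow m' i j).set (j+1) ((pvT i (j+1) : Nat) : Int) = pvPRow m' i (j+1) := by
  apply List.ext_getElem (by simp [length_pvPRow])
  intro k h1 h2
  simp only [length_pvPRow] at h2
  rw [List.getElem_set, pvPRow_getElem m' i (j+1) k h2]
  rcases eq_or_ne (j+1) k with hk | hk
  · subst hk; rw [if_pos rfl, if_pos (by omega)]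
  · rw [if_neg hk, pvPRow_getElem m' i j k h2]
    by_cases h3 : k ≤ j
    · rw [if_pos h3, if_pos (by omega)]
    · rw [if_neg h3, if_neg (by omega)]

lemma pvGet2_st (n' m' i j r c : Nat) (hr : r < n'+1) (hc : c < m'+1) :
    pvGet2 ((pvTbl n' m' i).set (i+1) (pvPRow m' (i+1) j)) (r : Int) (c : Int) =
      if r = i+1 then (if c ≤ j then (pvT (i+1) c : Int) else 0)
      else if r ≤ i then (pvT r c : Int) else 0 := by
  have hlen : ((pvTbl n' m' i).set (i+1) (pvPRow m' (i+1) j)).length = n'+1 := by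
    simp [length_pvTbl]
  unfold pvGet2
  rw [PySem.List.pyGet?_ofNat _ r (by omega)]
  rw [List.getElem_set]
  by_cases hri : i+1 = r
  · rw [if_pos hri, if_pos hri.symm]
    simp only [Option.bind]
    rw [PySem.List.pyGet?_ofNat _ c (by simp [length_pvPRow]; omega)]
    rw [pvPRow_getElem m' (i+1) j c hc]
    simp
  · rw [if_neg hri, if_neg (fun h => hri h.symm)]
    rw [pvTbl_getElem n' m' i r hr]
    by_cases hle : r ≤ i
    · rw [if_pos hle, if_pos hle]
      simp only [Option.bind]
      rw [PySem.List.pyGet?_ofNat _ c (by simp [length_pvRow]; omega)]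
      rw [pvRow_getElem m' r c hc]
      simp
    · rw [if_neg hle, if_neg hle]
      simp only [Option.bind]
      rw [PySem.List.pyGet?_ofNat _ c (by simp [length_pvRow]; omega)]
      rw [pvRow_getElem m' 0 c hc, pvT_zero_left]
      simp

lemma inner_step (n' m' i j : Nat) (hi : i+1 ≤ n') (hj : j+1 ≤ m') :
    pvInnerStep ((pvTbl n' m' i).set (i+1) (pvPRow m' (i+1) j)) ((i:Int)+1) ((j:Int)+1)
      = (pvTbl n' m' i).set (i+1) (pvPRow m' (i+1) (j+1)) := by
  have c1 : ((i:Int)+1) = ((i+1 : Nat) : Int) := by push_cast; ring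
  have c2 : ((j:Int)+1) = ((j+1 : Nat) : Int) := by push_cast; ring
  have hv : (if ((i:Int)+1) = 1 ∨ ((j:Int)+1) = 1 then (1:Int)
      else pvGet2 ((pvTbl n' m' i).set (i+1) (pvPRow m' (i+1) j)) ((i:Int)+1-1) ((j:Int)+1)
        + pvGet2 ((pvTbl n' m' i).set (i+1) (pvPRow m' (i+1) j)) ((i:Int)+1) ((j:Int)+1-1)
        + pvGet2 ((pvTbl n' m' i).set (i+1) (pvPRow m' (i+1) j)) ((i:Int)+1-1) ((j:Int)+1-1))
      = ((pvT (i+1) (j+1) : Nat) : Int) := by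
    by_cases hcase : i = 0 ∨ j = 0
    · rw [if_pos]
      · rcases hcase with h | h
        · subst h; simp [pvT]
        · subst h
          cases i with
          | zero => simp [pvT]
          | succ i' => simp [pvT]
      · rcases hcase with h | h <;> subst h <;> [left; right] <;> norm_num
    · push_neg at hcase
      obtain ⟨hi0, hj0⟩ := hcase
      rw [if_neg (by push_cast; omega)]
      have e1 : ((i:Int)+1-1) = ((i : Nat) : Int) := by ring
      have e2 : ((j:Int)+1-1) = ((j : Nat) : Int) := by ring
      rw [e1, e2, c2]
      rw [pvGet2_st n' m' i j i (j+1) (by omega) (by omega)]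
      rw [c1]
      rw [pvGet2_st n' m' i j (i+1) j (by omega) (by omega)]
      rw [pvGet2_st n' m' i j i j (by omega) (by omega)]
      rw [if_neg (by omega), if_pos (by omega), if_pos rfl, if_pos (by omega),
        if_neg (by omega), if_pos (by omega)]
      obtain ⟨i', rfl⟩ : ∃ i', i = i'+1 := ⟨i-1, by omega⟩
      obtain ⟨j', rfl⟩ : ∃ j', j = j'+1 := ⟨j-1, by omega⟩
      rw [show i'+1+1 = i'+2 from rfl, show j'+1+1 = j'+2 from rfl]
      simp only [pvT]
      push_cast
      ring
  unfold pvInnerStep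
  rw [hv]
  unfold pvSet2
  have t1 : ((i:Int)+1).toNat = i+1 := by omega
  have t2 : ((j:Int)+1).toNat = j+1 := by omega
  rw [t1, t2]
  have hget : ((pvTbl n' m' i).set (i+1) (pvPRow m' (i+1) j)).getD (i+1) [] = pvPRow m' (i+1) j := by
    rw [List.getD_eq_getElem _ _ (by simp [length_pvTbl]; omega)]
    rw [List.getElem_set, if_pos rfl]
  rw [hget, List.set_set, pvPRow_set m' (i+1) j hj]

lemma tbl_row_up (n' m' i : Nat) (hi : i+1 ≤ n') :
    pvTbl n' m' i = (pvTbl n' m' i).set (i+1) (pvPRow m' (i+1) 0) := by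
  rw [pvPRow_zero]
  apply List.ext_getElem (by simp [length_pvTbl])
  intro k h1 h2
  rw [List.getElem_set]
  simp only [length_pvTbl] at h1
  by_cases hk : i+1 = k
  · rw [if_pos hk]
    subst hk
    rw [pvTbl_getElem n' m' i (i+1) (by omega), if_neg (by omega)]
  · rw [if_neg hk]

lemma tbl_set_full (n' m' i : Nat) (hi : i+1 ≤ n') :
    (pvTbl n' m' i).set (i+1) (pvRow m' (i+1)) = pvTbl n' m' (i+1) := by
  apply List.ext_getElem (by simp [length_pvTbl])
  intro k h1 h2
  rw [List.getElem_set]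
  simp only [List.length_set, length_pvTbl] at h1
  rw [pvTbl_getElem n' m' (i+1) k (by omega)]
  by_cases hk : i+1 = k
  · rw [if_pos hk, if_pos (by omega)]; rw [← hk]
  · rw [if_neg hk, pvTbl_getElem n' m' i k (by omega)]
    by_cases hle : k ≤ i
    · rw [if_pos hle, if_pos (by omega)]
    · rw [if_neg hle, if_neg (by omega)]

lemma inner_fold (n' m' i : Nat) (hi : i+1 ≤ n') : ∀ t j, j + t = m' →
    (PySem.List.pyRange ((j:Int)+1) ((m':Int)+1) 1).foldl
        (fun dp jj => pvInnerStep dp ((i:Int)+1) jj)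
        ((pvTbl n' m' i).set (i+1) (pvPRow m' (i+1) j))
      = (pvTbl n' m' i).set (i+1) (pvRow m' (i+1)) := by
  intro t
  induction t with
  | zero =>
    intro j hj
    rw [PySem.List.pyRange_one_eq_nil (by omega), List.foldl_nil,
      pvPRow_full m' (i+1) j (by omega)]
  | succ t ih =>
    intro j hj
    rw [PySem.List.pyRange_one_cons (by omega), List.foldl_cons]
    rw [inner_step n' m' i j hi (by omega)]
    have := ih (j+1) (by omega)
    rw [show ((j+1 : Nat) : Int) = (j:Int)+1 by push_cast; ring] at this
    exact this

lemma outer_step (n' m' i : Nat) (hi : i+1 ≤ n') :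
    pvOuterStep (m' : Int) (pvTbl n' m' i) ((i:Int)+1) = pvTbl n' m' (i+1) := by
  unfold pvOuterStep
  conv_lhs => rw [tbl_row_up n' m' i hi]
  have h := inner_fold n' m' i hi m' 0 (by omega)
  norm_num at h
  rw [h, tbl_set_full n' m' i hi]

lemma outer_fold (n' m' : Nat) : ∀ t i, i + t = n' →
    (PySem.List.pyRange ((i:Int)+1) ((n':Int)+1) 1).foldl (pvOuterStep (m':Int)) (pvTbl n' m' i)
      = pvTbl n' m' n' := by
  intro t
  induction t with
  | zero =>
    intro i hi
    rw [PySem.List.pyRange_one_eq_nil (by omega), List.foldl_nil]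
    rw [show i = n' by omega]
  | succ t ih =>
    intro i hi
    rw [PySem.List.pyRange_one_cons (by omega), List.foldl_cons]
    rw [outer_step n' m' i (by omega)]
    have := ih (i+1) (by omega)
    rw [show ((i+1 : Nat) : Int) = (i:Int)+1 by push_cast; ring] at this
    exact this

lemma kingPath_eq_T (n' m' : Nat) : kingPath (n' : Int) (m' : Int) = ((pvT n' m' : Nat) : Int) := by
  unfold kingPath
  have hdp0 : (PySem.List.pyRange 0 ((n':Int)+1) 1).map
      (fun _ => List.replicate (((m':Int)+1).toNat) (0:Int)) = pvTbl n' m' 0 := by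
    have hl : (PySem.List.pyRange 0 ((n':Int)+1) 1).length = n'+1 := by
      rw [PySem.List.length_pyRange_one]; omega
    rw [List.map_const', hl, show (((m':Int)+1).toNat) = m'+1 by omega]
    unfold pvTbl
    rw [show (List.range (n'+1)).map (fun r => if r ≤ 0 then pvRow m' r else pvRow m' 0)
        = (List.range (n'+1)).map (fun _ => pvRow m' 0) from
      List.map_congr_left (by
        intro r _
        by_cases h : r ≤ 0
        · rw [if_pos h, Nat.le_zero.mp h]
        · rw [if_neg h])]
    rw [List.map_const', List.length_range, pvRow_zero]
  rw [hdp0]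
  have hfold := outer_fold n' m' n' 0 (by omega)
  norm_num at hfold
  show pvGet2 ((PySem.List.pyRange 1 ((n':Int)+1) 1).foldl (pvOuterStep (m':Int)) (pvTbl n' m' 0)) (-1) (-1) = ((pvT n' m' : Nat) : Int)
  rw [hfold]
  unfold pvGet2
  have hrow : PySem.List.pyGet? (pvTbl n' m' n') (-1) = some (pvRow m' n') := by
    unfold PySem.List.pyGet? PySem.List.pyIdx?
    rw [length_pvTbl]
    rw [if_neg (by omega), if_pos (by omega)]
    simp only [Option.bind]
    rw [show (n'+1) - ((-(-1:Int)).toNat) = n' by omega]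
    rw [List.getElem?_eq_getElem (by simp [length_pvTbl])]
    rw [pvTbl_getElem n' m' n' n' (by omega), if_pos le_rfl]
  rw [hrow]
  simp only [Option.bind]
  have hcell : PySem.List.pyGet? (pvRow m' n') (-1) = some ((pvT n' m' : Nat) : Int) := by
    unfold PySem.List.pyGet? PySem.List.pyIdx?
    rw [length_pvRow]
    rw [if_neg (by omega), if_pos (by omega)]
    simp only [Option.bind]
    rw [show (m'+1) - ((-(-1:Int)).toNat) = m' by omega]
    rw [List.getElem?_eq_getElem (by simp [length_pvRow])]
    rw [pvRow_getElem m' n' m' (by omega)]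
  rw [hcell]
  rfl

-- ===== VERDICT (by name: the statement is the Claim_ definition above) =====
theorem kingPath_spec : Claim_equal_kingPath := by
  intro n m _ hpre
  obtain ⟨hn, hm⟩ := hpre
  unfold Spec_kingPath
  obtain ⟨n', rfl⟩ : ∃ n' : Nat, n = (n' : Int) := ⟨n.toNat, by omega⟩
  obtain ⟨m', rfl⟩ : ∃ m' : Nat, m = (m' : Int) := ⟨m.toNat, by omega⟩
  rw [kingPath_eq_T]
  cases n' with
  | zero =>
    rw [pvT_zero_left]
    unfold kingPath_alt
    rw [if_pos (Or.inl (by norm_num))]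
    norm_num
  | succ a =>
    cases m' with
    | zero =>
      rw [pvT_zero_right]
      unfold kingPath_alt
      rw [if_pos (Or.inr (by norm_num))]
      norm_num
    | succ b =>
      rw [pvT_succ a b, pvDel_eq_S a b, pvS_stab a b (by omega) (le_refl (min a b + 1))]
      rw [show ((a+1 : Nat) : Int) = (a:Int)+1 by push_cast; ring,
          show ((b+1 : Nat) : Int) = (b:Int)+1 by push_cast; ring]
      exact (alt_eq_S a b).symm
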